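-- pv_equiv track=rewrite | github.com/MrSaturn1/jamba-swarm2 | fastapi-backend/app/boss_agent_creator.py | parse_swarm_plan
-- ===== SOURCE A (Python) =====
-- from typing import List, Dict
--
-- def parse_swarm_plan(plan: str) -> List[Dict[str, str]]:
--     """
--     Parses the swarm plan into a list of agent specifications.
--
--     Args:
--         plan (str): The swarm plan as a structured string.
--
--     Returns:
--         List[Dict[str, str]]: A list of dictionaries, each containing an agent's specifications.
--     """
--     agents = []
--     current_agent = {}
--
--     for line in plan.split('\n'):
--         if line.startswith("Agent:"):
--             if current_agent:
--                 agents.append(current_agent)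
--             current_agent = {"name": line.split("Agent:")[1].strip()}
--         elif line.startswith("System Prompt:"):
--             current_agent["system_prompt"] = line.split("System Prompt:")[1].strip()
--         elif line.startswith("Task:"):
--             current_agent["task"] = line.split("Task:")[1].strip()
--
--     if current_agent:
--         agents.append(current_agent)
--
--     return agents
-- ===== SOURCE B (Python) =====
-- from typing import List, Dict
--
-- # B: two-phase decomposition — partition the lines into record blocks (a leading
-- # nameless block plus one block per "Agent:" line), then build each block's dict
-- # from a prefix->key table and keep the non-empty ones.
--
-- _PREFIXES = (("Agent:", "name"), ("System Prompt:", "system_prompt"), ("Task:", "task"))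
--
--
-- def _field(line):
--     for prefix, key in _PREFIXES:
--         if line.startswith(prefix):
--             return key, line.split(prefix)[1].strip()
--     return None
--
--
-- def _blocks(lines):
--     cur = []
--     for line in lines:
--         if line.startswith("Agent:"):
--             yield cur
--             cur = [line]
--         else:
--             cur.append(line)
--     yield cur
--
--
-- def parse_swarm_plan(plan: str) -> List[Dict[str, str]]:
--     specs = []
--     for block in _blocks(plan.split('\n')):
--         spec = dict(f for f in map(_field, block) if f is not None)
--         if spec:
--             specs.append(spec)
--     return specs
-- ===== Notes on version B (the rewrite author's own statement) =====
-- stated objective: alternative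
-- what changed: A is a single-pass state machine mutating a current-agent dict; B first partitions the lines into record blocks (a leading nameless block plus one block per 'Agent:' line) and then builds each block's dict from a prefix->key table, keeping the non-empty ones.
import Mathlib
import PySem

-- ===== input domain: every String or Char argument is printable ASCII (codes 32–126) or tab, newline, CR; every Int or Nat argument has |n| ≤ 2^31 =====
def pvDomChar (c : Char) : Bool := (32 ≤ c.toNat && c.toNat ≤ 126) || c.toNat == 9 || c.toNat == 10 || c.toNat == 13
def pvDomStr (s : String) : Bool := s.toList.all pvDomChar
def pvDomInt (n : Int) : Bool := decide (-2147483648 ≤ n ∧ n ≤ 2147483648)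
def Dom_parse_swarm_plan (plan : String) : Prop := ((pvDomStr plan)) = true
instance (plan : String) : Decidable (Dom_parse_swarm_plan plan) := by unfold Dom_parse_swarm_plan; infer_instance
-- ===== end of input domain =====

-- B re-decomposes A's single-pass state machine into two phases: partition the lines into
-- record blocks (leading nameless block + one block per "Agent:" line), then build each
-- block's dict from a prefix->key table and keep the non-empty ones (objective: alternative).


-- ===== PORT A =====
-- line.split(sep)[1].strip(): separators are non-empty literals so split? is never none,
-- and the call sites guarantee line startswith sep, so index 1 exists (defaults never used).
def paVal (line sep : String) : String :=
  PySem.Str.strip (((PySem.Str.split? line sep).getD []).getD 1 "")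

-- loop body of A: state = (agents, current_agent)
def paStep (st : List (PySem.Dict String String) × PySem.Dict String String)
    (line : String) : List (PySem.Dict String String) × PySem.Dict String String :=
  let (agents, cur) := st
  if PySem.Str.startswith line "Agent:" then
    ((if cur.items.isEmpty then agents else agents ++ [cur]),
      PySem.Dict.empty.insert "name" (paVal line "Agent:"))
  else if PySem.Str.startswith line "System Prompt:" then
    (agents, cur.insert "system_prompt" (paVal line "System Prompt:"))
  else if PySem.Str.startswith line "Task:" then
    (agents, cur.insert "task" (paVal line "Task:"))
  else
    (agents, cur)

def parse_swarm_plan (plan : String) : List (List (String × String)) :=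
  let st := ((PySem.Str.split? plan "\n").getD []).foldl paStep ([], PySem.Dict.empty)
  let agents := if st.2.items.isEmpty then st.1 else st.1 ++ [st.2]
  agents.map (·.items)

-- ===== PORT B =====
def pbPrefixes : List (String × String) :=
  [("Agent:", "name"), ("System Prompt:", "system_prompt"), ("Task:", "task")]

-- _field's for-loop with early return
def pbFieldGo : List (String × String) → String → Option (String × String)
  | [], _ => none
  | (prefix_, key) :: rest, line =>
    if PySem.Str.startswith line prefix_ then
      some (key, PySem.Str.strip (((PySem.Str.split? line prefix_).getD []).getD 1 ""))
    else pbFieldGo rest line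

def pbField (line : String) : Option (String × String) := pbFieldGo pbPrefixes line

-- _blocks: loop state = (blocks yielded so far, current block)
def pbBlocksStep (st : List (List String) × List String) (line : String) :
    List (List String) × List String :=
  if PySem.Str.startswith line "Agent:" then (st.1 ++ [st.2], [line])
  else (st.1, st.2 ++ [line])

def pbBlocks (lines : List String) : List (List String) :=
  let st := lines.foldl pbBlocksStep ([], [])
  st.1 ++ [st.2]

-- dict(f for f in map(_field, block) if f is not None)
def pbSpecOf (block : List String) : PySem.Dict String String :=
  (block.filterMap pbField).foldl (fun d kv => d.insert kv.1 kv.2) PySem.Dict.empty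

def parse_swarm_plan_alt (plan : String) : List (List (String × String)) :=
  (pbBlocks ((PySem.Str.split? plan "\n").getD [])).foldl
    (fun specs b =>
      if (pbSpecOf b).items.isEmpty then specs else specs ++ [(pbSpecOf b).items]) []

-- ===== PRECONDITION & SPEC =====
def Spec_parse_swarm_plan (plan : String) (out : List (List (String × String))) : Prop := out = parse_swarm_plan_alt plan
instance (plan : String) (out : List (List (String × String))) : Decidable (Spec_parse_swarm_plan plan out) := by unfold Spec_parse_swarm_plan; infer_instance

-- ===== CLAIM (what is proved, stated in full; the proofs are below) =====
def Claim_equal_parse_swarm_plan : Prop := ∀ (plan : String), Dom_parse_swarm_plan plan → Spec_parse_swarm_plan plan (parse_swarm_plan plan)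

-- ===== LEMMAS AND PROOFS =====

-- emitted agents (as dicts) for a list of finished blocks
def pbEmitD (blocks : List (List String)) : List (PySem.Dict String String) :=
  blocks.foldl (fun acc b => if (pbSpecOf b).items.isEmpty then acc else acc ++ [pbSpecOf b]) []

theorem pbEmitD_snoc (blocks : List (List String)) (b : List String) :
    pbEmitD (blocks ++ [b])
      = if (pbSpecOf b).items.isEmpty then pbEmitD blocks else pbEmitD blocks ++ [pbSpecOf b] := by
  simp only [pbEmitD, List.foldl_append, List.foldl_cons, List.foldl_nil]

theorem pbSpecOf_snoc (block : List String) (line : String) :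
    pbSpecOf (block ++ [line])
      = match pbField line with
        | none => pbSpecOf block
        | some kv => (pbSpecOf block).insert kv.1 kv.2 := by
  simp only [pbSpecOf, List.filterMap_append]
  cases h : pbField line <;> simp [h]

-- the foldl of B that appends .items equals pbEmitD followed by .items
theorem pbEmitItems_eq (blocks : List (List String)) (accD : List (PySem.Dict String String)) :
    blocks.foldl
        (fun specs b =>
          if (pbSpecOf b).items.isEmpty then specs else specs ++ [(pbSpecOf b).items])
        (accD.map (·.items))
      = (blocks.foldl (fun acc b => if (pbSpecOf b).items.isEmpty then acc else acc ++ [pbSpecOf b]) accD).map (·.items) := by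
  induction blocks generalizing accD with
  | nil => rfl
  | cons b bs ih =>
    simp only [List.foldl_cons]
    by_cases h : (pbSpecOf b).items.isEmpty = true
    · simp only [if_pos h]; exact ih accD
    · simp only [if_neg h]
      rw [← ih (accD ++ [pbSpecOf b])]
      simp

-- main invariant: A's fold state is determined by B's block-fold state
theorem inv_main (lines : List String) (blocks : List (List String)) (curB : List String) :
    lines.foldl paStep (pbEmitD blocks, pbSpecOf curB)
      = (pbEmitD (lines.foldl pbBlocksStep (blocks, curB)).1,
         pbSpecOf (lines.foldl pbBlocksStep (blocks, curB)).2) := by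
  induction lines generalizing blocks curB with
  | nil => rfl
  | cons line rest ih =>
    simp only [List.foldl_cons]
    by_cases hA : PySem.Str.startswith line "Agent:" = true
    · have hB : pbBlocksStep (blocks, curB) line = (blocks ++ [curB], [line]) := by
        simp at hA
        simp [pbBlocksStep, hA]
      have hstep : paStep (pbEmitD blocks, pbSpecOf curB) line
          = (pbEmitD (blocks ++ [curB]), pbSpecOf [line]) := by
        simp at hA
        simp [paStep, hA, pbEmitD_snoc, pbSpecOf, pbField, pbPrefixes, pbFieldGo, paVal]
      rw [hstep, hB]
      exact ih (blocks ++ [curB]) [line]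
    · have hB : pbBlocksStep (blocks, curB) line = (blocks, curB ++ [line]) := by
        simp at hA
        simp [pbBlocksStep, hA]
      have hstep : paStep (pbEmitD blocks, pbSpecOf curB) line
          = (pbEmitD blocks, pbSpecOf (curB ++ [line])) := by
        rw [pbSpecOf_snoc]
        simp at hA
        by_cases hS : PySem.Str.startswith line "System Prompt:" = true
        · simp at hS
          simp [paStep, pbField, pbPrefixes, pbFieldGo, paVal, hA, hS]
        · simp at hS
          by_cases hT : PySem.Str.startswith line "Task:" = true
          · simp at hT
            simp [paStep, pbField, pbPrefixes, pbFieldGo, paVal, hA, hS, hT]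
          · simp at hT
            simp [paStep, pbField, pbPrefixes, pbFieldGo, hA, hS, hT]
      rw [hstep, hB]
      exact ih blocks (curB ++ [line])

-- ===== VERDICT (by name: the statement is the Claim_ definition above) =====
theorem parse_swarm_plan_spec : Claim_equal_parse_swarm_plan := by
  intro plan _
  show parse_swarm_plan plan = parse_swarm_plan_alt plan
  simp only [parse_swarm_plan, parse_swarm_plan_alt, pbBlocks]
  set st := List.foldl pbBlocksStep ([], []) ((PySem.Str.split? plan "\n").getD []) with hst
  have h := inv_main ((PySem.Str.split? plan "\n").getD []) [] []
  rw [show pbEmitD [] = [] from rfl, show pbSpecOf [] = PySem.Dict.empty from rfl, ← hst] at h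
  rw [h]
  have h2 := pbEmitItems_eq (st.1 ++ [st.2]) []
  simp only [List.map_nil] at h2
  rw [h2]
  rw [show List.foldl (fun acc b => if (pbSpecOf b).items.isEmpty then acc else acc ++ [pbSpecOf b]) [] (st.1 ++ [st.2]) = pbEmitD (st.1 ++ [st.2]) from rfl, pbEmitD_snoc]
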